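-- pv_equiv track=rewrite | github.com/Hamza08dev/Med_bill_calculator | src/userdoc/parse_provider_type.py | _score_types
-- ===== SOURCE A (Python) =====
-- from typing import List, Dict, Any, Tuple
--
-- def _score_types(text: str, patterns: Dict[str, List[str]]) -> Dict[str, int]:
--     b = (text or "").lower()
--     scores = {k: 0 for k in patterns.keys()}
--     for k, words in patterns.items():
--         for w in words:
--             if w.lower() in b:
--                 scores[k] += 1
--     return scores
-- ===== SOURCE B (Python) =====
-- def _score_types(text, patterns):
--     b = (text or "").lower()
--     # index once: every substring of b whose length is a pattern-word length
--     lengths = {len(w) for ws in patterns.values() for w in ws}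
--     subs = {b[i:i + n] for n in lengths for i in range(len(b) - n + 1)}
--     return {k: sum(1 for w in ws if w.lower() in subs) for k, ws in patterns.items()}
-- ===== Notes on version B (the rewrite author's own statement) =====
-- stated objective: faster
-- what changed: B replaces A's per-word substring scan over a mutable score dict with a substring index: it builds the set of all substrings of the lowered text at the occurring word lengths once, then answers each word by a hash-set lookup inside a single dict comprehension.
import Mathlib
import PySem

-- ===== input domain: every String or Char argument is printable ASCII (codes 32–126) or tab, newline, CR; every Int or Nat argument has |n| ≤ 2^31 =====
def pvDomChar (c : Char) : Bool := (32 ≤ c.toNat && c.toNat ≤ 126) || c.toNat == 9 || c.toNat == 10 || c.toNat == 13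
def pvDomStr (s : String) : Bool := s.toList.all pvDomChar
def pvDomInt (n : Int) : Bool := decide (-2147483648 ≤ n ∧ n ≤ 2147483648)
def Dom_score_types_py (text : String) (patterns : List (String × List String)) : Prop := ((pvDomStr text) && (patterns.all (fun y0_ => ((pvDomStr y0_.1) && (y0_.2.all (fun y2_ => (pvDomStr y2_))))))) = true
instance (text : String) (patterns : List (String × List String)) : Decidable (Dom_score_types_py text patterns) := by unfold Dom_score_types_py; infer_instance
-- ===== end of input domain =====

-- B replaces A's per-word substring scan over a mutable score dict by a substring index of the
-- lowered text built once (all substrings at the occurring word lengths), answered by set lookups;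
-- objective: alternative algorithm (hash index instead of repeated scans).

-- ===== PORT A =====
-- 'if w.lower() in b' test of A
def pvACond (b : String) (w : String) : Bool := PySem.Str.isIn (PySem.Str.lower w) b
-- A's inner 'for w in words: if …: scores[k] += 1' loop (scores[k] += 1 on an existing key is modify)
def pvAInner (b : String) (key : String) (d : PySem.Dict String Int) (ws : List String) : PySem.Dict String Int :=
  ws.foldl (fun d w => if pvACond b w then d.modify key 0 (· + 1) else d) d

def score_types_py (text : String) (patterns : List (String × List String)) : List (String × Int) :=
  -- b = (text or "").lower()  ('' or s lowers to the same string either way)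
  let b := PySem.Str.lower text
  -- the association list stands for the Python dict: its items in dict order
  let items := (PySem.Dict.ofList patterns).items
  -- scores = {k: 0 for k in patterns.keys()}
  let scores : PySem.Dict String Int := items.foldl (fun d kv => d.insert kv.1 0) PySem.Dict.empty
  -- for k, words in patterns.items(): …
  (items.foldl (fun d kv => pvAInner b kv.1 d kv.2) scores).items

-- ===== PORT B =====
def score_types_py_alt (text : String) (patterns : List (String × List String)) : List (String × Int) :=
  -- b = (text or "").lower()   (kept as List Char: PySem defines string ops on the list side)
  let b := (PySem.Str.lower text).toList
  let items := (PySem.Dict.ofList patterns).items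
  -- lengths = {len(w) for ws in patterns.values() for w in ws}
  let lengths : PySem.Set Nat := PySem.Set.ofList (items.flatMap (fun kv => kv.2.map (fun w => w.toList.length)))
  -- subs = {b[i:i+n] for n in lengths for i in range(len(b) - n + 1)}
  -- (range clamps a negative stop to empty, which Nat 'b.length + 1 - n' matches exactly)
  let subs : PySem.Set (List Char) :=
    PySem.Set.ofList (lengths.flatMap (fun n =>
      (List.range (b.length + 1 - n)).map (fun (i : Nat) => PySem.List.slice b (some (i : Int)) (some ((i : Int) + (n : Int))))))
  -- {k: sum(1 for w in ws if w.lower() in subs) for k, ws in patterns.items()}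
  items.map (fun kv => (kv.1, (kv.2.countP (fun w => subs.contains (PySem.Str.lower w).toList) : Int)))

-- ===== PRECONDITION & SPEC =====
def Spec_score_types_py (text : String) (patterns : List (String × List String)) (out : List (String × Int)) : Prop := out = score_types_py_alt text patterns
instance (text : String) (patterns : List (String × List String)) (out : List (String × Int)) : Decidable (Spec_score_types_py text patterns out) := by unfold Spec_score_types_py; infer_instance

-- ===== CLAIM (what is proved, stated in full; the proofs are below) =====
def Claim_equal_score_types_py : Prop := ∀ (text : String) (patterns : List (String × List String)), Dom_score_types_py text patterns → Spec_score_types_py text patterns (score_types_py text patterns)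

-- ===== LEMMAS AND PROOFS =====

-- the inner loop changes only the entry at `key`, adding the number of matching words
theorem pvAInner_getD (b key : String) (ws : List String) (d : PySem.Dict String Int) (k : String) :
    (pvAInner b key d ws).getD k 0 =
      if k = key then d.getD k 0 + (ws.countP (pvACond b) : Int) else d.getD k 0 := by
  induction ws generalizing d with
  | nil => simp [pvAInner]
  | cons w t ih =>
    simp only [pvAInner, List.foldl_cons] at *
    by_cases hw : pvACond b w = true
    · rw [ih, List.countP_cons]
      simp [hw, PySem.Dict.getD_modify]
      split_ifs with h
      · subst h; omega
      · rfl
    · rw [ih, List.countP_cons]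
      simp [hw]

theorem pvAInner_keys (b key : String) (ws : List String) (d : PySem.Dict String Int)
    (h : d.contains key = true) : (pvAInner b key d ws).keys = d.keys := by
  induction ws generalizing d with
  | nil => simp [pvAInner]
  | cons w t ih =>
    simp only [pvAInner, List.foldl_cons] at *
    by_cases hw : pvACond b w = true
    · simp only [hw, if_true]
      rw [ih _ (by simp [PySem.Dict.contains_modify, h])]
      rw [PySem.Dict.keys_modify, PySem.Dict.keys_insert_of_contains _ _ h]
    · simp only [hw]
      simpa using ih d h

theorem pvAOuter_keys (b : String) (L : List (String × List String)) (d : PySem.Dict String Int)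
    (h : ∀ kv ∈ L, d.contains kv.1 = true) :
    (L.foldl (fun d kv => pvAInner b kv.1 d kv.2) d).keys = d.keys := by
  induction L generalizing d with
  | nil => rfl
  | cons kv t ih =>
    simp only [List.foldl_cons]
    have hk := pvAInner_keys b kv.1 kv.2 d (h kv (by simp))
    rw [ih _ ?_, hk]
    intro kv' hkv'
    rw [PySem.Dict.contains_iff_mem_keys, hk, ← PySem.Dict.contains_iff_mem_keys]
    exact h kv' (by simp [hkv'])

theorem pvAOuter_untouched (b : String) (L : List (String × List String)) (d : PySem.Dict String Int)
    (k : String) (hk : k ∉ L.map Prod.fst) :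
    (L.foldl (fun d kv => pvAInner b kv.1 d kv.2) d).getD k 0 = d.getD k 0 := by
  induction L generalizing d with
  | nil => rfl
  | cons kv t ih =>
    simp only [List.map_cons, List.mem_cons, not_or] at hk
    simp only [List.foldl_cons]
    rw [ih _ hk.2, pvAInner_getD, if_neg hk.1]

theorem pvAOuter_getD (b : String) (L : List (String × List String)) (d : PySem.Dict String Int)
    (hnd : (L.map Prod.fst).Nodup) (kv : String × List String) (hkv : kv ∈ L) :
    (L.foldl (fun d kv => pvAInner b kv.1 d kv.2) d).getD kv.1 0 =
      d.getD kv.1 0 + (kv.2.countP (pvACond b) : Int) := by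
  induction L generalizing d with
  | nil => cases hkv
  | cons hd t ih =>
    simp only [List.map_cons, List.nodup_cons] at hnd
    simp only [List.foldl_cons]
    rcases List.mem_cons.mp hkv with rfl | hmem
    · rw [pvAOuter_untouched b t _ kv.1 hnd.1, pvAInner_getD, if_pos rfl]
    · rw [ih _ hnd.2 hmem, pvAInner_getD, if_neg]
      intro hEq
      exact hnd.1 (hEq ▸ List.mem_map_of_mem hmem)

-- every member of B's substring index is an infix of the text; conversely every infix whose
-- length occurs in `lens` is in the index
theorem pvSub_mem_iff (cs : List Char) (lens : List Nat) (t : List Char) (hl : t.length ∈ lens) :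
    (t ∈ lens.flatMap (fun n => (List.range (cs.length + 1 - n)).map (fun i => (cs.drop i).take n)))
      ↔ t <:+: cs := by
  constructor
  · intro h
    rcases List.mem_flatMap.mp h with ⟨n, _, hmem⟩
    rcases List.mem_map.mp hmem with ⟨i, _, rfl⟩
    exact (List.take_prefix _ _).isInfix.trans (List.drop_suffix _ _).isInfix
  · rintro ⟨pre, suf, rfl⟩
    refine List.mem_flatMap.mpr ⟨t.length, hl, List.mem_map.mpr ⟨pre.length, ?_, ?_⟩⟩
    · simp only [List.mem_range, List.length_append]
      omega
    · rw [List.append_assoc, List.drop_left, List.take_left]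

-- lower preserves length (character-wise map)
theorem pvLower_length (cs : List Char) : (PySem.Chars.lower cs).length = cs.length := by
  simp [PySem.Chars.lower]

-- ===== VERDICT (by name: the statement is the Claim_ definition above) =====
theorem score_types_py_spec : Claim_equal_score_types_py := by
  intro text patterns _
  unfold Spec_score_types_py score_types_py score_types_py_alt
  simp only []
  set b := PySem.Str.lower text with hb
  set L := (PySem.Dict.ofList patterns).items with hL
  have hkeys : (PySem.Dict.ofList patterns).keys = L.map Prod.fst := rfl
  have hnd : (L.map Prod.fst).Nodup := by
    rw [← hkeys]; exact PySem.Dict.nodup_keys_ofList patterns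
  have hfresh : ∀ a ∈ L, (PySem.Dict.empty : PySem.Dict String Int).contains a.1 = false := by
    intro a _; simp [PySem.Dict.contains_empty]
  have hscores :
      (L.foldl (fun d kv => d.insert kv.1 0) (PySem.Dict.empty : PySem.Dict String Int)).items
        = L.map (fun kv => (kv.1, (0 : Int))) := by
    simpa using PySem.Dict.items_foldl_insert_fresh L Prod.fst (fun _ => (0 : Int)) PySem.Dict.empty hfresh hnd
  set scores := L.foldl (fun d kv => d.insert kv.1 0) (PySem.Dict.empty : PySem.Dict String Int) with hsc
  have hscKeys : scores.keys = L.map Prod.fst := by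
    show scores.items.map Prod.fst = _
    rw [hscores, List.map_map]; rfl
  have hscContains : ∀ kv ∈ L, scores.contains kv.1 = true := by
    intro kv hkv
    rw [PySem.Dict.contains_iff_mem_keys, hscKeys]
    exact List.mem_map_of_mem hkv
  have hscGetD : ∀ kv ∈ L, scores.getD kv.1 0 = 0 := by
    intro kv hkv
    exact PySem.Dict.getD_of_mem_items scores
      (by rw [hscores]; exact List.mem_map.mpr ⟨kv, hkv, rfl⟩)
      (by rw [hscKeys]; exact hnd) 0
  set F := L.foldl (fun d kv => pvAInner b kv.1 d kv.2) scores with hF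
  have hFkeys : F.keys = L.map Prod.fst := by
    rw [hF, pvAOuter_keys b L scores hscContains, hscKeys]
  have hA : F.items = L.map (fun kv => (kv.1, F.getD kv.1 0)) := by
    rw [PySem.Dict.items_eq_map_keys F (by rw [hFkeys]; exact hnd) 0, hFkeys, List.map_map]
    rfl
  rw [hA]
  apply List.map_congr_left
  intro kv hkv
  have hval : F.getD kv.1 0 = (kv.2.countP (pvACond b) : Int) := by
    rw [hF, pvAOuter_getD b L scores hnd kv hkv, hscGetD kv hkv, zero_add]
  rw [hval]
  congr 1
  rw [Int.natCast_inj]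
  apply List.countP_congr
  intro w hw
  have hlen : (PySem.Str.lower w).toList.length
      ∈ (PySem.Set.ofList (L.flatMap (fun kv => kv.2.map (fun w => w.toList.length))) : PySem.Set Nat) := by
    rw [PySem.Str.toList_lower, pvLower_length, PySem.Set.mem_ofList]
    exact List.mem_flatMap.mpr ⟨kv, hkv, List.mem_map.mpr ⟨w, hw, rfl⟩⟩
  simp only [pvACond]
  rw [PySem.Str.isIn_iff_infix, PySem.Set.contains_iff, PySem.Set.mem_ofList]
  have hslice :
      ((PySem.Set.ofList (L.flatMap (fun kv => kv.2.map (fun w => w.toList.length))) : PySem.Set Nat).flatMap (fun n =>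
        (List.range (b.toList.length + 1 - n)).map (fun (i : Nat) => PySem.List.slice b.toList (some (i : Int)) (some ((i : Int) + (n : Int))))))
      = ((PySem.Set.ofList (L.flatMap (fun kv => kv.2.map (fun w => w.toList.length))) : PySem.Set Nat).flatMap (fun n =>
        (List.range (b.toList.length + 1 - n)).map (fun i => (b.toList.drop i).take n))) := by
    exact List.flatMap_congr (fun n _ => List.map_congr_left (fun i _ => PySem.List.slice_natCast_add b.toList i n))
  rw [hslice]
  exact (pvSub_mem_iff b.toList _ (PySem.Str.lower w).toList hlen).symm
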